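-- pv_equiv track=rewrite | github.com/abhi-portrait/Major-Project | polls/twoFasset.py | initialTwoFacetList
-- ===== SOURCE A (Python) =====
-- def  initialTwoFacetList(attackList,cityList,targetList):
--     initialList = list()
--     # if len(attackList)<3 or len(cityList)<3 or len(targetList)<3 :
--     #     initialList.append("Unable to fetch data")
--     #     return initialList
--     attr1Len = len(attackList)
--     attr2Len = len(cityList)
--     attr3Len = len(targetList)
--
--     for i in range(0,attr1Len,2):
--         for j in range(0,attr2Len,2):
--             if (i+1) < attr1Len and (j+1) < attr2Len:
--                 anyList = list()
--                 anyList.append(attackList[i])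
--                 anyList.append(cityList[j])
--                 anyList.append(attackList[i+1])
--                 anyList.append(cityList[j+1])
--                 initialList.append(anyList)
--
--     for i in range(0,attr1Len,2):
--         for j in range(0,3,2):
--             if (i+1) < attr1Len and (j+1) < 3:
--                 anyList = list()
--                 anyList.append(attackList[i])
--                 anyList.append(targetList[j])
--                 anyList.append(attackList[i+1])
--                 anyList.append(targetList[j+1])
--                 initialList.append(anyList)
--
--     for i in range(0,attr2Len,2):
--         for j in range(0,attr3Len,2):
--             if (i+1) < attr2Len and (j+1) < attr3Len:
--                 anyList = list()
--                 anyList.append(cityList[i])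
--                 anyList.append(targetList[j])
--                 anyList.append(cityList[i+1])
--                 anyList.append(targetList[j+1])
--                 initialList.append(anyList)
--
--     if len(initialList)>16:
--         del initialList[16:]
--     return initialList
-- ===== SOURCE B (Python) =====
-- def initialTwoFacetList(attackList, cityList, targetList):
--     # Index-arithmetic construction: compute only the (at most 16) surviving rows
--     # directly from the row number, never materializing the full cross products.
--     na = len(attackList) // 2
--     nc = len(cityList) // 2
--     nt = len(targetList) // 2
--     n1 = na * nc
--     n2 = na
--     n3 = nc * nt
--     out = []
--     for r in range(min(16, n1 + n2 + n3)):
--         if r < n1: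
--             i, j = divmod(r, nc)
--             out.append([attackList[2*i], cityList[2*j],
--                         attackList[2*i+1], cityList[2*j+1]])
--         elif r < n1 + n2:
--             i = r - n1
--             out.append([attackList[2*i], targetList[0],
--                         attackList[2*i+1], targetList[1]])
--         else:
--             i, j = divmod(r - n1 - n2, nt)
--             out.append([cityList[2*i], targetList[2*j],
--                         cityList[2*i+1], targetList[2*j+1]])
--     return out
-- ===== Notes on version B (the rewrite author's own statement) =====
-- stated objective: faster
-- what changed: B never enumerates the cross products: it computes the total row count from the pair counts, loops over at most 16 row numbers, and reconstructs each row directly by divmod index arithmetic on the row number, instead of A's three nested step-2 loops that build every cross-pair row and then delete everything past the 16th.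
import Mathlib
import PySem

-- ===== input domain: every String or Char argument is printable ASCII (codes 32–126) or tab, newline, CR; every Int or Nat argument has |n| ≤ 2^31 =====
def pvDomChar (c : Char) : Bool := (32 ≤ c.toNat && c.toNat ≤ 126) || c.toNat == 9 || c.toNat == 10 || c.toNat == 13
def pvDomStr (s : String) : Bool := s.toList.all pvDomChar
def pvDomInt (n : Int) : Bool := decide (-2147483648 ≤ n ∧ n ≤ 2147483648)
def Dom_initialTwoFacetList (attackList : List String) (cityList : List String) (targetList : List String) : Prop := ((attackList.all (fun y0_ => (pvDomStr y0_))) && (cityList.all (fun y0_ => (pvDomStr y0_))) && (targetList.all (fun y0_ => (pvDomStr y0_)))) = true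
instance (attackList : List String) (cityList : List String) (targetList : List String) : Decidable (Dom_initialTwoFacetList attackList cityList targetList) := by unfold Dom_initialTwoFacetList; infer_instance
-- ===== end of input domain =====

-- B builds only the at most 16 surviving rows directly by divmod index arithmetic on the row
-- number, instead of A's three nested step-2 loops that materialize every cross-pair row and
-- then delete the tail.

-- ===== PORT A =====
-- Loop indices produced by the ranges are nonnegative and guarded in range, so pyGetD "" is exact
-- there; the only unguarded accesses are targetList[0]/targetList[1] in loop 2 (A raises IndexError
-- when they are out of range and the guard i+1 < attr1Len fires), excluded by Pre_ below.
def initialTwoFacetList (attackList : List String) (cityList : List String) (targetList : List String) : List (List String) :=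
  let attr1Len : Int := attackList.length
  let attr2Len : Int := cityList.length
  let attr3Len : Int := targetList.length
  let l1 : List (List String) :=
    (PySem.List.pyRange 0 attr1Len 2).foldl (fun acc i =>
      (PySem.List.pyRange 0 attr2Len 2).foldl (fun acc j =>
        if i + 1 < attr1Len ∧ j + 1 < attr2Len then
          acc ++ [[PySem.List.pyGetD attackList i "", PySem.List.pyGetD cityList j "",
                   PySem.List.pyGetD attackList (i+1) "", PySem.List.pyGetD cityList (j+1) ""]]
        else acc) acc) []
  let l2 : List (List String) :=
    (PySem.List.pyRange 0 attr1Len 2).foldl (fun acc i =>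
      (PySem.List.pyRange 0 3 2).foldl (fun acc j =>
        if i + 1 < attr1Len ∧ j + 1 < 3 then
          acc ++ [[PySem.List.pyGetD attackList i "", PySem.List.pyGetD targetList j "",
                   PySem.List.pyGetD attackList (i+1) "", PySem.List.pyGetD targetList (j+1) ""]]
        else acc) acc) l1
  let l3 : List (List String) :=
    (PySem.List.pyRange 0 attr2Len 2).foldl (fun acc i =>
      (PySem.List.pyRange 0 attr3Len 2).foldl (fun acc j =>
        if i + 1 < attr2Len ∧ j + 1 < attr3Len then
          acc ++ [[PySem.List.pyGetD cityList i "", PySem.List.pyGetD targetList j "",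
                   PySem.List.pyGetD cityList (i+1) "", PySem.List.pyGetD targetList (j+1) ""]]
        else acc) acc) l2
  if l3.length > 16 then l3.take 16 else l3

-- ===== PORT B =====
-- Faithful to Source B: pair counts by //2, then one loop over the row numbers range(min(16, total)),
-- each row rebuilt by divmod index arithmetic (in the Python the divisors nc/nt are nonzero
-- whenever their branch is reached, since r < na*nc forces nc > 0 etc.).
def initialTwoFacetList_alt (attackList : List String) (cityList : List String) (targetList : List String) : List (List String) :=
  let na : Int := PySem.Int.floordiv (attackList.length : Int) 2
  let nc : Int := PySem.Int.floordiv (cityList.length : Int) 2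
  let nt : Int := PySem.Int.floordiv (targetList.length : Int) 2
  let n1 : Int := na * nc
  let n2 : Int := na
  let n3 : Int := nc * nt
  (PySem.List.pyRange 0 (min 16 (n1 + n2 + n3)) 1).foldl (fun out r =>
    if r < n1 then
      let i := PySem.Int.floordiv r nc
      let j := PySem.Int.mod r nc
      out ++ [[PySem.List.pyGetD attackList (2*i) "", PySem.List.pyGetD cityList (2*j) "",
               PySem.List.pyGetD attackList (2*i+1) "", PySem.List.pyGetD cityList (2*j+1) ""]]
    else if r < n1 + n2 then
      let i := r - n1
      out ++ [[PySem.List.pyGetD attackList (2*i) "", PySem.List.pyGetD targetList 0 "",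
               PySem.List.pyGetD attackList (2*i+1) "", PySem.List.pyGetD targetList 1 ""]]
    else
      let i := PySem.Int.floordiv (r - n1 - n2) nt
      let j := PySem.Int.mod (r - n1 - n2) nt
      out ++ [[PySem.List.pyGetD cityList (2*i) "", PySem.List.pyGetD targetList (2*j) "",
               PySem.List.pyGetD cityList (2*i+1) "", PySem.List.pyGetD targetList (2*j+1) ""]]) []

-- ===== PRECONDITION & SPEC =====
-- Pre_ excludes exactly the inputs where the Python A raises IndexError (loop 2 reads
-- targetList[0] and targetList[1] whenever attackList holds a full consecutive pair).
def Pre_initialTwoFacetList (attackList : List String) (cityList : List String) (targetList : List String) : Prop :=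
  2 ≤ attackList.length → 2 ≤ targetList.length
instance (attackList : List String) (cityList : List String) (targetList : List String) : Decidable (Pre_initialTwoFacetList attackList cityList targetList) := by unfold Pre_initialTwoFacetList; infer_instance

def pvWitness_initialTwoFacetList : List String × List String × List String :=
  (["a", "b"], ["c", "d"], ["t", "u"])

def Spec_initialTwoFacetList (attackList : List String) (cityList : List String) (targetList : List String) (out : List (List String)) : Prop := out = initialTwoFacetList_alt attackList cityList targetList
instance (attackList : List String) (cityList : List String) (targetList : List String) (out : List (List String)) : Decidable (Spec_initialTwoFacetList attackList cityList targetList out) := by unfold Spec_initialTwoFacetList; infer_instance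

-- ===== CLAIM (what is proved, stated in full; the proofs are below) =====
def Claim_equal_initialTwoFacetList : Prop := ∀ (attackList : List String) (cityList : List String) (targetList : List String), Dom_initialTwoFacetList attackList cityList targetList → Pre_initialTwoFacetList attackList cityList targetList → Spec_initialTwoFacetList attackList cityList targetList (initialTwoFacetList attackList cityList targetList)

-- ===== LEMMAS AND PROOFS =====

-- Proof-side canonical form: consecutive pairs of a list.
def pvPairs {α : Type} : List α → List (α × α)
  | a :: b :: r => (a, b) :: pvPairs r
  | _ => []

theorem pvPairs_length {α : Type} : ∀ (L : List α), (pvPairs L).length = L.length / 2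
  | [] => by simp [pvPairs]
  | [_] => by simp [pvPairs]
  | _ :: _ :: r => by
    have := pvPairs_length r
    simp [pvPairs, this]
    omega

theorem pvPairs_getD (L : List String) : ∀ (k : Nat), 2 * k + 1 < L.length →
    (pvPairs L).getD k ("", "") = (L.getD (2 * k) "", L.getD (2 * k + 1) "") :=
  match L with
  | [] => by intro k h; simp at h
  | [x] => by intro k h; simp at h
  | x :: y :: r => by
    intro k h
    match k with
    | 0 => simp [pvPairs]
    | k + 1 =>
      have hr : 2 * k + 1 < r.length := by simp at h ⊢; omega
      have IH := pvPairs_getD r k hr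
      have e1 : 2 * (k + 1) = (2 * k).succ.succ := by omega
      simp only [pvPairs, e1, List.getD_cons_succ, IH]

-- A's step-2 loop over one list, in Nat-index form, is a flatMap over the consecutive pairs.
theorem foldl_range2_pairs {α β : Type} (d : α) (lst : List α) (g : α → α → List β) :
    ∀ acc : List β,
      (List.range ((lst.length + 1) / 2)).foldl
        (fun acc k => if 2 * k + 1 < lst.length then acc ++ g (lst.getD (2 * k) d) (lst.getD (2 * k + 1) d) else acc) acc
      = acc ++ (pvPairs lst).flatMap (fun p => g p.1 p.2) :=
  match lst with
  | [] => by intro acc; simp [pvPairs]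
  | [x] => by intro acc; simp [pvPairs, List.range_succ]
  | x :: y :: r => by
    intro acc
    have IH := foldl_range2_pairs d r g
    have hcnt : ((x :: y :: r).length + 1) / 2 = (r.length + 1) / 2 + 1 := by simp; omega
    rw [hcnt, List.range_succ_eq_map, List.foldl_cons, List.foldl_map]
    have h0 : (if 2 * 0 + 1 < (x :: y :: r).length then
        acc ++ g ((x :: y :: r).getD (2 * 0) d) ((x :: y :: r).getD (2 * 0 + 1) d) else acc)
        = acc ++ g x y := by simp
    rw [h0]
    have hbody : (fun (a : List β) (k : Nat) =>
        if 2 * (k + 1) + 1 < (x :: y :: r).length then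
          a ++ g ((x :: y :: r).getD (2 * (k + 1)) d) ((x :: y :: r).getD (2 * (k + 1) + 1) d) else a)
        = (fun a k => if 2 * k + 1 < r.length then a ++ g (r.getD (2 * k) d) (r.getD (2 * k + 1) d) else a) := by
      funext a k
      have h1 : 2 * (k + 1) = 2 * k + 1 + 1 := by omega
      simp only [List.length_cons, h1, List.getD_cons_succ]
      exact if_congr (by omega) rfl rfl
    have hs : (fun (a : List β) (k : Nat) =>
        if 2 * Nat.succ k + 1 < (x :: y :: r).length then
          a ++ g ((x :: y :: r).getD (2 * Nat.succ k) d) ((x :: y :: r).getD (2 * Nat.succ k + 1) d) else a)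
        = (fun a k => if 2 * k + 1 < r.length then a ++ g (r.getD (2 * k) d) (r.getD (2 * k + 1) d) else a) := by
      simpa [Nat.succ_eq_add_one] using hbody
    rw [hs, IH]
    simp [pvPairs]

-- A step-2 Int pyRange fold is a Nat range fold over half the length.
theorem foldl_pyRange2_gen {β : Type} (n : Nat) (F : List β → Int → List β) (G : List β → Nat → List β)
    (acc : List β) (hFG : ∀ (a : List β) (k : Nat), F a ((2 * k : Nat) : Int) = G a k) :
    (PySem.List.pyRange 0 (n : Int) 2).foldl F acc = (List.range ((n + 1) / 2)).foldl G acc := by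
  rw [PySem.List.pyRange_of_pos 0 (n : Int) (by norm_num)]
  have hc : (if (0:Int) < (n : Int) then (((n : Int) - 0 + 2 - 1) / 2).toNat else 0) = (n + 1) / 2 := by
    split <;> omega
  rw [hc, List.foldl_map]
  congr 1
  funext a k
  have h1 : (0 : Int) + 2 * (k : Int) = ((2 * k : Nat) : Int) := by push_cast; ring
  rw [h1, hFG]

-- A's single guarded step-2 loop equals a flatMap over the consecutive pairs.
theorem single_loop_eq {α γ : Type} (d1 : α) (L1 : List α) (g : α → α → List γ) (acc : List γ) :
    (PySem.List.pyRange 0 (L1.length : Int) 2).foldl (fun a i =>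
        if i + 1 < (L1.length : Int) then
          a ++ g (PySem.List.pyGetD L1 i d1) (PySem.List.pyGetD L1 (i+1) d1) else a) acc
      = acc ++ (pvPairs L1).flatMap (fun p => g p.1 p.2) := by
  rw [foldl_pyRange2_gen L1.length _
        (fun a k => if 2 * k + 1 < L1.length then a ++ g (L1.getD (2 * k) d1) (L1.getD (2 * k + 1) d1) else a)
        acc ?_, foldl_range2_pairs]
  intro a k
  have harg : ((2 * k : Nat) : Int) + 1 = ((2 * k + 1 : Nat) : Int) := by push_cast; ring
  rw [harg]
  simp only [PySem.List.pyGetD_natCast]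
  exact if_congr (by omega) rfl rfl

-- A's doubly-guarded nested step-2 loops equal a nested flatMap over the two pair lists.
theorem nested_loop_eq {α β γ : Type} (d1 : α) (d2 : β) (L1 : List α) (L2 : List β)
    (g : α → α → β → β → List γ) (acc : List γ) :
    (PySem.List.pyRange 0 (L1.length : Int) 2).foldl (fun acc i =>
        (PySem.List.pyRange 0 (L2.length : Int) 2).foldl (fun acc j =>
          if i + 1 < (L1.length : Int) ∧ j + 1 < (L2.length : Int) then
            acc ++ g (PySem.List.pyGetD L1 i d1) (PySem.List.pyGetD L1 (i+1) d1)
                     (PySem.List.pyGetD L2 j d2) (PySem.List.pyGetD L2 (j+1) d2)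
          else acc) acc) acc
      = acc ++ (pvPairs L1).flatMap (fun p => (pvPairs L2).flatMap (fun q => g p.1 p.2 q.1 q.2)) := by
  rw [foldl_pyRange2_gen L1.length _
        (fun a k => if 2 * k + 1 < L1.length then
            a ++ (pvPairs L2).flatMap (fun q => g (L1.getD (2 * k) d1) (L1.getD (2 * k + 1) d1) q.1 q.2)
          else a)
        acc ?_]
  · exact foldl_range2_pairs d1 L1 (fun a0 a1 => (pvPairs L2).flatMap fun q => g a0 a1 q.1 q.2) acc
  intro a k
  by_cases h : 2 * k + 1 < L1.length
  · have hbody : (fun (a : List γ) (j : Int) =>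
        if ((2 * k : Nat) : Int) + 1 < (L1.length : Int) ∧ j + 1 < (L2.length : Int) then
          a ++ g (PySem.List.pyGetD L1 ((2 * k : Nat) : Int) d1) (PySem.List.pyGetD L1 (((2 * k : Nat) : Int)+1) d1)
                 (PySem.List.pyGetD L2 j d2) (PySem.List.pyGetD L2 (j+1) d2)
        else a)
        = (fun a j => if j + 1 < (L2.length : Int) then
            a ++ g (PySem.List.pyGetD L1 ((2 * k : Nat) : Int) d1) (PySem.List.pyGetD L1 (((2 * k : Nat) : Int)+1) d1)
                   (PySem.List.pyGetD L2 j d2) (PySem.List.pyGetD L2 (j+1) d2)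
          else a) := by
      funext a j
      exact if_congr (by omega) rfl rfl
    rw [hbody, single_loop_eq d2 L2 _ a]
    beta_reduce
    rw [if_pos h]
    have harg : ((2 * k : Nat) : Int) + 1 = ((2 * k + 1 : Nat) : Int) := by push_cast; ring
    rw [harg]
    simp only [PySem.List.pyGetD_natCast]
  · have hbody : (fun (a : List γ) (j : Int) =>
        if ((2 * k : Nat) : Int) + 1 < (L1.length : Int) ∧ j + 1 < (L2.length : Int) then
          a ++ g (PySem.List.pyGetD L1 ((2 * k : Nat) : Int) d1) (PySem.List.pyGetD L1 (((2 * k : Nat) : Int)+1) d1)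
                 (PySem.List.pyGetD L2 j d2) (PySem.List.pyGetD L2 (j+1) d2)
        else a)
        = (fun (a : List γ) (_ : Int) => a) := by
      funext a j
      rw [if_neg]
      omega
    rw [hbody, List.foldl_fixed]
    beta_reduce
    rw [if_neg h]

-- A's second loop (range(0,3,2) inner loop) appends one target row per attack pair.
theorem loop2_eq (A T : List String) (acc : List (List String)) :
    (PySem.List.pyRange 0 (A.length : Int) 2).foldl (fun acc i =>
        (PySem.List.pyRange 0 3 2).foldl (fun acc j =>
          if i + 1 < (A.length : Int) ∧ j + 1 < 3 then
            acc ++ [[PySem.List.pyGetD A i "", PySem.List.pyGetD T j "",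
                     PySem.List.pyGetD A (i+1) "", PySem.List.pyGetD T (j+1) ""]]
          else acc) acc) acc
      = acc ++ (pvPairs A).flatMap (fun p =>
          [[p.1, PySem.List.pyGetD T 0 "", p.2, PySem.List.pyGetD T 1 ""]]) := by
  have hr : PySem.List.pyRange 0 3 2 = [0, 2] := by decide
  have hinner : (fun (a : List (List String)) (i : Int) =>
      (PySem.List.pyRange 0 3 2).foldl (fun acc j =>
        if i + 1 < (A.length : Int) ∧ j + 1 < 3 then
          acc ++ [[PySem.List.pyGetD A i "", PySem.List.pyGetD T j "",
                   PySem.List.pyGetD A (i+1) "", PySem.List.pyGetD T (j+1) ""]]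
        else acc) a)
      = (fun a i => if i + 1 < (A.length : Int) then
          a ++ [[PySem.List.pyGetD A i "", PySem.List.pyGetD T 0 "",
                 PySem.List.pyGetD A (i+1) "", PySem.List.pyGetD T 1 ""]]
        else a) := by
    funext a i
    rw [hr]
    simp only [List.foldl_cons, List.foldl_nil]
    norm_num
  rw [hinner]
  exact single_loop_eq "" A
    (fun a0 a1 => [[a0, PySem.List.pyGetD T 0 "", a1, PySem.List.pyGetD T 1 ""]]) acc

-- map over range of getD = plain map.
theorem map_range_getD {α γ : Type} (d : α) (l : List α) (g : α → γ) :
    (List.range l.length).map (fun i => g (l.getD i d)) = l.map g := by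
  apply List.ext_getElem
  · simp
  · intro i h1 h2
    simp only [List.getElem_map, List.getElem_range]
    rw [List.getD_eq_getElem l d (by simpa using h2)]

-- Indexing a rectangular flatMap-of-map product by divmod of the flat row number.
theorem prod_index {α β γ : Type} (dx : α) (dy : β) (xs : List α) (ys : List β) (f : α → β → γ) :
    xs.flatMap (fun x => ys.map (f x))
      = (List.range (xs.length * ys.length)).map
          (fun r => f (xs.getD (r / ys.length) dx) (ys.getD (r % ys.length) dy)) := by
  induction xs with
  | nil => simp
  | cons x xs IH =>
    by_cases hb : ys.length = 0
    · have hy : ys = [] := List.length_eq_zero_iff.mp hb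
      simp [hy]
    · have hb' : 0 < ys.length := Nat.pos_of_ne_zero hb
      have hlen : (x :: xs).length * ys.length = ys.length + xs.length * ys.length := by
        simp [Nat.succ_mul, Nat.add_comm]
      rw [hlen, List.range_add, List.map_append, List.map_map]
      have h1 : (List.range ys.length).map
          (fun r => f ((x :: xs).getD (r / ys.length) dx) (ys.getD (r % ys.length) dy))
          = ys.map (f x) := by
        rw [← map_range_getD dy ys (f x)]
        apply List.map_congr_left
        intro r hr
        rw [List.mem_range] at hr
        rw [Nat.div_eq_of_lt hr, Nat.mod_eq_of_lt hr]
        rfl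
      have h2 : (List.range (xs.length * ys.length)).map
          ((fun r => f ((x :: xs).getD (r / ys.length) dx) (ys.getD (r % ys.length) dy)) ∘
            (fun j => ys.length + j))
          = (List.range (xs.length * ys.length)).map
            (fun r => f (xs.getD (r / ys.length) dx) (ys.getD (r % ys.length) dy)) := by
        apply List.map_congr_left
        intro r _
        simp only [Function.comp]
        have hd : (ys.length + r) / ys.length = r / ys.length + 1 := by
          rw [Nat.add_comm, Nat.add_div_right _ hb']
        have hm : (ys.length + r) % ys.length = r % ys.length := Nat.add_mod_left _ _
        rw [hd, hm, List.getD_cons_succ]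
      rw [List.flatMap_cons, IH, h1, h2]

-- The Nat-level row builder that B's loop computes (proof-side only).
def pvRowNat (A C T : List String) (k : Nat) : List String :=
  if k < A.length / 2 * (C.length / 2) then
    [A.getD (2 * (k / (C.length / 2))) "", C.getD (2 * (k % (C.length / 2))) "",
     A.getD (2 * (k / (C.length / 2)) + 1) "", C.getD (2 * (k % (C.length / 2)) + 1) ""]
  else if k < A.length / 2 * (C.length / 2) + A.length / 2 then
    [A.getD (2 * (k - A.length / 2 * (C.length / 2))) "", PySem.List.pyGetD T 0 "",
     A.getD (2 * (k - A.length / 2 * (C.length / 2)) + 1) "", PySem.List.pyGetD T 1 ""]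
  else
    [C.getD (2 * ((k - A.length / 2 * (C.length / 2) - A.length / 2) / (T.length / 2))) "",
     T.getD (2 * ((k - A.length / 2 * (C.length / 2) - A.length / 2) % (T.length / 2))) "",
     C.getD (2 * ((k - A.length / 2 * (C.length / 2) - A.length / 2) / (T.length / 2)) + 1) "",
     T.getD (2 * ((k - A.length / 2 * (C.length / 2) - A.length / 2) % (T.length / 2)) + 1) ""]

-- One cross-pair section in range-indexed form.
theorem sec_pairs_eq (X Y : List String) :
    (pvPairs X).flatMap (fun p => (pvPairs Y).map (fun q => [p.1, q.1, p.2, q.2]))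
      = (List.range (X.length / 2 * (Y.length / 2))).map (fun r =>
          [X.getD (2 * (r / (Y.length / 2))) "", Y.getD (2 * (r % (Y.length / 2))) "",
           X.getD (2 * (r / (Y.length / 2)) + 1) "", Y.getD (2 * (r % (Y.length / 2)) + 1) ""]) := by
  rw [prod_index ("", "") ("", "") (pvPairs X) (pvPairs Y) (fun p q => [p.1, q.1, p.2, q.2])]
  simp only [pvPairs_length]
  apply List.map_congr_left
  intro r hr
  rw [List.mem_range] at hr
  have hy : 0 < Y.length / 2 := by
    rcases Nat.eq_zero_or_pos (Y.length / 2) with h | h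
    · rw [h, Nat.mul_zero] at hr; omega
    · exact h
  have hdiv : r / (Y.length / 2) < X.length / 2 := (Nat.div_lt_iff_lt_mul hy).mpr hr
  have hmod : r % (Y.length / 2) < Y.length / 2 := Nat.mod_lt _ hy
  rw [pvPairs_getD X _ (by omega), pvPairs_getD Y _ (by omega)]

-- The middle (target) section in range-indexed form.
theorem sec2_eq (X T : List String) :
    (pvPairs X).map (fun p => [p.1, PySem.List.pyGetD T 0 "", p.2, PySem.List.pyGetD T 1 ""])
      = (List.range (X.length / 2)).map (fun i =>
          [X.getD (2 * i) "", PySem.List.pyGetD T 0 "", X.getD (2 * i + 1) "", PySem.List.pyGetD T 1 ""]) := by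
  rw [← map_range_getD ("", "") (pvPairs X)
        (fun p => [p.1, PySem.List.pyGetD T 0 "", p.2, PySem.List.pyGetD T 1 ""])]
  simp only [pvPairs_length]
  apply List.map_congr_left
  intro i hi
  rw [List.mem_range] at hi
  rw [pvPairs_getD X i (by omega)]

-- Assembling three range-maps into one range-map over the sum.
theorem assemble {γ : Type} (N1 N2 N3 : Nat) (g1 g2 g3 : Nat → γ) (F : Nat → γ)
    (h1 : ∀ k, k < N1 → F k = g1 k)
    (h2 : ∀ j, j < N2 → F (N1 + j) = g2 j)
    (h3 : ∀ j, j < N3 → F (N1 + N2 + j) = g3 j) :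
    (List.range N1).map g1 ++ (List.range N2).map g2 ++ (List.range N3).map g3
      = (List.range (N1 + N2 + N3)).map F := by
  rw [List.range_add, List.map_append, List.map_map, List.range_add, List.map_append, List.map_map]
  congr 1
  · congr 1
    · exact List.map_congr_left fun k hk => (h1 k (List.mem_range.mp hk)).symm
    · apply List.map_congr_left
      intro j hj
      simp only [Function.comp_apply]
      exact (h2 j (List.mem_range.mp hj)).symm
  · apply List.map_congr_left
    intro j hj
    simp only [Function.comp_apply]
    exact (h3 j (List.mem_range.mp hj)).symm

-- The canonical section concatenation is the range-map of pvRowNat.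
theorem canonical_eq (A C T : List String) :
    (pvPairs A).flatMap (fun p => (pvPairs C).map (fun q => [p.1, q.1, p.2, q.2]))
      ++ (pvPairs A).map (fun p => [p.1, PySem.List.pyGetD T 0 "", p.2, PySem.List.pyGetD T 1 ""])
      ++ (pvPairs C).flatMap (fun p => (pvPairs T).map (fun q => [p.1, q.1, p.2, q.2]))
      = (List.range (A.length / 2 * (C.length / 2) + A.length / 2 + C.length / 2 * (T.length / 2))).map
          (pvRowNat A C T) := by
  rw [sec_pairs_eq A C, sec2_eq A T, sec_pairs_eq C T]
  apply assemble
  · intro k hk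
    simp only [pvRowNat]
    rw [if_pos hk]
  · intro j hj
    simp only [pvRowNat]
    rw [if_neg (by omega), if_pos (by omega)]
    have e : A.length / 2 * (C.length / 2) + j - A.length / 2 * (C.length / 2) = j := by omega
    rw [e]
  · intro j hj
    simp only [pvRowNat]
    rw [if_neg (by omega), if_neg (by omega)]
    have e : A.length / 2 * (C.length / 2) + A.length / 2 + j
        - A.length / 2 * (C.length / 2) - A.length / 2 = j := by omega
    rw [e]

-- Casting helpers for pyGetD with doubled Nat indices.
theorem pyGetD_two_mul {α : Type} (xs : List α) (n : Nat) (d : α) :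
    PySem.List.pyGetD xs (2 * (n : Int)) d = xs.getD (2 * n) d := by
  have e : (2 * (n : Int)) = ((2 * n : Nat) : Int) := by push_cast; ring
  rw [e, PySem.List.pyGetD_natCast]

theorem pyGetD_two_mul_add_one {α : Type} (xs : List α) (n : Nat) (d : α) :
    PySem.List.pyGetD xs (2 * (n : Int) + 1) d = xs.getD (2 * n + 1) d := by
  have e : (2 * (n : Int) + 1) = ((2 * n + 1 : Nat) : Int) := by push_cast; ring
  rw [e, PySem.List.pyGetD_natCast]

-- B's port computes the range-map of pvRowNat truncated to min 16 total.
theorem alt_eq (A C T : List String) :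
    initialTwoFacetList_alt A C T
      = (List.range (min 16 (A.length / 2 * (C.length / 2) + A.length / 2 + C.length / 2 * (T.length / 2)))).map
          (pvRowNat A C T) := by
  simp only [initialTwoFacetList_alt]
  have hA : PySem.Int.floordiv ((A.length : Int)) 2 = ((A.length / 2 : Nat) : Int) := by
    exact_mod_cast PySem.Int.floordiv_natCast A.length 2
  have hC : PySem.Int.floordiv ((C.length : Int)) 2 = ((C.length / 2 : Nat) : Int) := by
    exact_mod_cast PySem.Int.floordiv_natCast C.length 2
  have hT : PySem.Int.floordiv ((T.length : Int)) 2 = ((T.length / 2 : Nat) : Int) := by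
    exact_mod_cast PySem.Int.floordiv_natCast T.length 2
  rw [hA, hC, hT]
  have hmin : min (16 : Int)
      (((A.length / 2 : Nat) : Int) * ((C.length / 2 : Nat) : Int) + ((A.length / 2 : Nat) : Int)
        + ((C.length / 2 : Nat) : Int) * ((T.length / 2 : Nat) : Int))
      = ((min 16 (A.length / 2 * (C.length / 2) + A.length / 2 + C.length / 2 * (T.length / 2)) : Nat) : Int) := by
    push_cast
    omega
  rw [hmin, PySem.List.pyRange_zero_natCast, List.foldl_map]
  have hbody : (fun (out : List (List String)) (k : Nat) =>
      if (k : Int) < ((A.length / 2 : Nat) : Int) * ((C.length / 2 : Nat) : Int) then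
        out ++ [[PySem.List.pyGetD A (2 * PySem.Int.floordiv (k : Int) ((C.length / 2 : Nat) : Int)) "",
                 PySem.List.pyGetD C (2 * PySem.Int.mod (k : Int) ((C.length / 2 : Nat) : Int)) "",
                 PySem.List.pyGetD A (2 * PySem.Int.floordiv (k : Int) ((C.length / 2 : Nat) : Int) + 1) "",
                 PySem.List.pyGetD C (2 * PySem.Int.mod (k : Int) ((C.length / 2 : Nat) : Int) + 1) ""]]
      else if (k : Int) < ((A.length / 2 : Nat) : Int) * ((C.length / 2 : Nat) : Int) + ((A.length / 2 : Nat) : Int) then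
        out ++ [[PySem.List.pyGetD A (2 * ((k : Int) - ((A.length / 2 : Nat) : Int) * ((C.length / 2 : Nat) : Int))) "",
                 PySem.List.pyGetD T 0 "",
                 PySem.List.pyGetD A (2 * ((k : Int) - ((A.length / 2 : Nat) : Int) * ((C.length / 2 : Nat) : Int)) + 1) "",
                 PySem.List.pyGetD T 1 ""]]
      else
        out ++ [[PySem.List.pyGetD C (2 * PySem.Int.floordiv ((k : Int) - ((A.length / 2 : Nat) : Int) * ((C.length / 2 : Nat) : Int) - ((A.length / 2 : Nat) : Int)) ((T.length / 2 : Nat) : Int)) "",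
                 PySem.List.pyGetD T (2 * PySem.Int.mod ((k : Int) - ((A.length / 2 : Nat) : Int) * ((C.length / 2 : Nat) : Int) - ((A.length / 2 : Nat) : Int)) ((T.length / 2 : Nat) : Int)) "",
                 PySem.List.pyGetD C (2 * PySem.Int.floordiv ((k : Int) - ((A.length / 2 : Nat) : Int) * ((C.length / 2 : Nat) : Int) - ((A.length / 2 : Nat) : Int)) ((T.length / 2 : Nat) : Int) + 1) "",
                 PySem.List.pyGetD T (2 * PySem.Int.mod ((k : Int) - ((A.length / 2 : Nat) : Int) * ((C.length / 2 : Nat) : Int) - ((A.length / 2 : Nat) : Int)) ((T.length / 2 : Nat) : Int) + 1) ""]])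
      = (fun out k => out ++ [pvRowNat A C T k]) := by
    funext out k
    simp only [pvRowNat]
    by_cases h1 : k < A.length / 2 * (C.length / 2)
    · rw [if_pos h1, if_pos (by exact_mod_cast h1)]
      rw [PySem.Int.floordiv_natCast, PySem.Int.mod_natCast,
          pyGetD_two_mul, pyGetD_two_mul, pyGetD_two_mul_add_one, pyGetD_two_mul_add_one]
    · rw [if_neg h1, if_neg (by exact_mod_cast h1)]
      by_cases h2 : k < A.length / 2 * (C.length / 2) + A.length / 2
      · rw [if_pos h2, if_pos (by exact_mod_cast h2)]
        have hle1 : A.length / 2 * (C.length / 2) ≤ k := Nat.le_of_not_lt h1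
        have hsub : (k : Int) - ((A.length / 2 : Nat) : Int) * ((C.length / 2 : Nat) : Int)
            = ((k - A.length / 2 * (C.length / 2) : Nat) : Int) := by
          rw [Nat.cast_sub hle1, Nat.cast_mul]
        rw [hsub, pyGetD_two_mul, pyGetD_two_mul_add_one]
      · rw [if_neg h2, if_neg (by exact_mod_cast h2)]
        have hle1 : A.length / 2 * (C.length / 2) ≤ k := Nat.le_of_not_lt h1
        have hle2 : A.length / 2 ≤ k - A.length / 2 * (C.length / 2) := by omega
        have hsub : (k : Int) - ((A.length / 2 : Nat) : Int) * ((C.length / 2 : Nat) : Int)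
            - ((A.length / 2 : Nat) : Int)
            = ((k - A.length / 2 * (C.length / 2) - A.length / 2 : Nat) : Int) := by
          rw [Nat.cast_sub hle2, Nat.cast_sub hle1, Nat.cast_mul]
        rw [hsub, PySem.Int.floordiv_natCast, PySem.Int.mod_natCast,
            pyGetD_two_mul, pyGetD_two_mul, pyGetD_two_mul_add_one, pyGetD_two_mul_add_one]
  rw [hbody, PySem.List.foldl_append_singleton_eq_map, List.nil_append]

-- ===== VERDICT (by name: the statement is the Claim_ definition above) =====
theorem initialTwoFacetList_spec : Claim_equal_initialTwoFacetList := by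
  intro A C T _ _
  unfold Spec_initialTwoFacetList
  simp only [initialTwoFacetList]
  rw [nested_loop_eq "" "" A C (fun a0 a1 c0 c1 => [[a0, c0, a1, c1]]) [],
      loop2_eq A T,
      nested_loop_eq "" "" C T (fun c0 c1 t0 t1 => [[c0, t0, c1, t1]])]
  have htake : ∀ (l : List (List String)), (if l.length > 16 then l.take 16 else l) = l.take 16 := by
    intro l
    split
    · rfl
    · exact (List.take_of_length_le (by omega)).symm
  rw [htake, alt_eq]
  have hflat : ∀ (P : List (String × String)) (Q : List (String × String))
      (f : String × String → String × String → List String),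
      P.flatMap (fun p => Q.flatMap (fun q => [f p q])) = P.flatMap (fun p => Q.map (f p)) := by
    intro P Q f
    simp [← List.map_eq_flatMap]
  have hS2 : (pvPairs A).flatMap (fun p => [[p.1, PySem.List.pyGetD T 0 "", p.2, PySem.List.pyGetD T 1 ""]])
      = (pvPairs A).map (fun p => [p.1, PySem.List.pyGetD T 0 "", p.2, PySem.List.pyGetD T 1 ""]) := by
    simp [← List.map_eq_flatMap]
  rw [List.nil_append]
  rw [hflat (pvPairs A) (pvPairs C) (fun p q => [p.1, q.1, p.2, q.2]),
      hflat (pvPairs C) (pvPairs T) (fun p q => [p.1, q.1, p.2, q.2]), hS2,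
      canonical_eq A C T]
  rw [← List.map_take, List.take_range]
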